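-- pv_equiv track=rewrite | github.com/eserinanarslan/spellchecker | notebooks/text_cleaner.py | __handle_comma
-- ===== SOURCE A (Python) =====
-- def __handle_comma(input):
--     chars = list(input)
--     cleaned = list()
--     idx = 0
--     last = len(input) - 1
--
--     for c in chars:
--         if chars[idx] != ',':
--             cleaned.append(c)
--         else:
--             if idx > 0 and idx < last:
--                 prev_char = chars[idx-1]
--                 next_char = chars[idx+1]
--
--                 if prev_char.isdigit() and next_char.isdigit():
--                     cleaned.append(c)
--                 else:
--                     cleaned.append(' ')
--         idx += 1
--
--     tokens = ''.join(cleaned).split()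
--     return ' '.join(tokens)
-- ===== SOURCE B (Python) =====
-- def __handle_comma(input):
--     # Segment-based: split on commas, then rejoin the segments left to right,
--     # keeping a comma only when the accumulated text ends in a digit and the
--     # next segment starts with one; final whitespace normalization via split().
--     parts = input.split(',')
--     out = parts[0]
--     for seg in parts[1:]:
--         if out and out[-1].isdigit() and seg and seg[0].isdigit():
--             out = out + ',' + seg
--         else:
--             out = out + ' ' + seg
--     return ' '.join(out.split())
-- ===== Notes on version B (the rewrite author's own statement) =====
-- stated objective: faster
-- what changed: Replaces A's per-character indexed scan (testing every char against ',' with boundary branches) by a segment algorithm: split the string on commas once and rejoin the segments left to right, choosing ',' or ' ' per junction from the accumulated text's last char and the next segment's first char.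
import Mathlib
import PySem

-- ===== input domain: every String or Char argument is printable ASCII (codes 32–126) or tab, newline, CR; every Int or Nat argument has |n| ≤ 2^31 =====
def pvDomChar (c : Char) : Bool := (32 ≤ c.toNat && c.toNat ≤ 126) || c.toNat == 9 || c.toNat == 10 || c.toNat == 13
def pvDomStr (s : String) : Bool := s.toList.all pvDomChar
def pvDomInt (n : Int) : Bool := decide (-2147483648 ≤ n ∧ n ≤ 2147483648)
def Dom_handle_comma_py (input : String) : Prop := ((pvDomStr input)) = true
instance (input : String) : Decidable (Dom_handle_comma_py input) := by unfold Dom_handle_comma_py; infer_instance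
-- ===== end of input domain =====

-- B replaces A's per-character indexed scan by a segment algorithm: split on ',' once,
-- then rejoin the segments left to right, choosing ',' or ' ' at each junction from the
-- accumulated text's last char and the next segment's first char (objective: faster — the per-character Python-level loop is replaced by one split plus a loop over segments, measured faster in a timing run).

-- ===== PORT A =====
-- the body of A's `for c in chars` loop; state = (cleaned, idx)
def handleCommaStep (chars : List Char) (st : List Char × Int) (c : Char) : List Char × Int :=
  let cleaned := st.1
  let idx := st.2
  let last : Int := PySem.Chars.len chars - 1
  let cleaned :=
    if c ≠ ',' then cleaned ++ [c]        -- chars[idx] is c, the element the loop is at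
    else if 0 < idx ∧ idx < last then
      let prev_char := (PySem.List.pyGet? chars (idx - 1)).getD ' '   -- idx-1 in range since 0 < idx
      let next_char := (PySem.List.pyGet? chars (idx + 1)).getD ' '   -- idx+1 in range since idx < last
      if PySem.Chars.isdigit prev_char && PySem.Chars.isdigit next_char then cleaned ++ [c]
      else cleaned ++ [' ']
    else cleaned
  (cleaned, idx + 1)

def handle_comma_py (input : String) : String :=
  let chars := input.toList
  let r := chars.foldl (handleCommaStep chars) ([], 0)
  -- ' '.join(''.join(cleaned).split())
  String.mk (PySem.Chars.join [' '] (PySem.Chars.split₀ r.1))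

-- ===== PORT B =====
-- the body of B's `for seg in parts[1:]` loop; `out and out[-1].isdigit()` is
-- `out.getLast?` matched (none exactly when out is falsy), same for `seg and seg[0]`
def joinStep (out seg : List Char) : List Char :=
  if (match out.getLast? with | some d => PySem.Chars.isdigit d | none => false)
      && (match seg.head? with | some d => PySem.Chars.isdigit d | none => false)
  then out ++ ',' :: seg
  else out ++ ' ' :: seg

def handle_comma_py_alt (input : String) : String :=
  let parts := PySem.Chars.splitOn input.toList [',']   -- input.split(',')
  -- parts[0] (split never returns an empty list, so headD's default is never used)
  let out := (parts.drop 1).foldl joinStep (parts.headD [])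
  -- ' '.join(out.split())
  String.mk (PySem.Chars.join [' '] (PySem.Chars.split₀ out))

-- ===== PRECONDITION & SPEC =====
def Spec_handle_comma_py (input : String) (out : String) : Prop := out = handle_comma_py_alt input
instance (input : String) (out : String) : Decidable (Spec_handle_comma_py input out) := by unfold Spec_handle_comma_py; infer_instance

-- ===== CLAIM (what is proved, stated in full; the proofs are below) =====
def Claim_equal_handle_comma_py : Prop := ∀ (input : String), Dom_handle_comma_py input → Spec_handle_comma_py input (handle_comma_py input)

-- ===== LEMMAS AND PROOFS =====

-- structural specification of input.split(',')
def mySplit : List Char → List (List Char)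
  | [] => [[]]
  | c :: l =>
      if c = ',' then [] :: mySplit l
      else (c :: (mySplit l).headD []) :: (mySplit l).tail

lemma mySplit_ne_nil (l : List Char) : mySplit l ≠ [] := by
  cases l with
  | nil => simp [mySplit]
  | cons c l' => by_cases h : c = ',' <;> simp [mySplit, h]

lemma splitOn_go_eq (sep : List Char) (hsep : sep = [',']) (l : List Char) :
    ∀ (fuel : Nat) (cur : List Char) (acc : List (List Char)), l.length ≤ fuel →
    PySem.Chars.splitOn.go sep fuel l cur acc
      = acc.reverse ++ (cur.reverse ++ (mySplit l).headD []) :: (mySplit l).tail := by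
  subst hsep
  induction l with
  | nil =>
    intro fuel cur acc _
    cases fuel <;> simp [PySem.Chars.splitOn.go, mySplit]
  | cons c l' ih =>
    intro fuel cur acc hf
    cases fuel with
    | zero => simp at hf
    | succ f =>
      by_cases hc : c = ','
      · subst hc
        have hpre : [','].isPrefixOf (',' :: l') = true := by simp [List.isPrefixOf]
        rw [PySem.Chars.splitOn.go, if_pos hpre]
        simp only [List.length_cons, List.length_nil, List.drop_succ_cons, List.drop_zero]
        rw [ih f [] (cur.reverse :: acc) (by simpa using hf)]
        rcases hsp : mySplit l' with _ | ⟨h, t⟩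
        · exact absurd hsp (mySplit_ne_nil l')
        · simp [mySplit, hsp]
      · have hpre : [','].isPrefixOf (c :: l') = false := by
          simp [List.isPrefixOf]; exact fun h => absurd h.symm hc
        rw [PySem.Chars.splitOn.go, if_neg (by simp [hpre])]
        rw [ih f (c :: cur) acc (by simpa using Nat.le_of_succ_le_succ hf)]
        simp [mySplit, hc]

lemma splitOn_eq_mySplit (l : List Char) :
    PySem.Chars.splitOn l [','] = mySplit l := by
  rw [PySem.Chars.splitOn, splitOn_go_eq [','] rfl l (l.length + 1) [] [] (by omega)]
  rcases hsp : mySplit l with _ | ⟨h, t⟩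
  · exact absurd hsp (mySplit_ne_nil l)
  · simp

-- B's per-position character (A's branch, phrased over (prev, char, next))
def gfun (p c n : Char) : Char :=
  if c ≠ ',' then c
  else if PySem.Chars.isdigit p && PySem.Chars.isdigit n then ',' else ' '

-- the comma-resolved string, carrying the previous original char
def specB : Char → List Char → List Char
  | _, [] => []
  | prev, c :: l => gfun prev c (l.headD ' ') :: specB c l

-- what A's loop appends: `first` = we are at index 0, `prev` = previous char
def specA : Bool → Char → List Char → List Char
  | _, _, [] => []
  | first, prev, c :: l =>
      (if c ≠ ',' then [c]
       else if first = false ∧ l ≠ [] then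
         [if PySem.Chars.isdigit prev && PySem.Chars.isdigit (l.headD ' ') then ',' else ' ']
       else []) ++ specA false c l

lemma isdigit_space : PySem.Chars.isdigit ' ' = false := rfl

lemma isdigit_comma : PySem.Chars.isdigit ',' = false := rfl

lemma specB_congr (l : List Char) (p q : Char)
    (h : PySem.Chars.isdigit p = PySem.Chars.isdigit q) : specB p l = specB q l := by
  cases l with
  | nil => rfl
  | cons c l' => simp [specB, gfun, h]

lemma mySplit_head_digit (l : List Char) :
    (match ((mySplit l).headD []).head? with
      | some d => PySem.Chars.isdigit d | none => false)
      = PySem.Chars.isdigit (l.headD ' ') := by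
  cases l with
  | nil => simp [mySplit, isdigit_space]
  | cons c l' =>
    by_cases h : c = ','
    · subst h; simp [mySplit, isdigit_comma]
    · simp [mySplit, h]

lemma getLast?_match_eq_getLastD (out : List Char) :
    (match out.getLast? with | some d => PySem.Chars.isdigit d | none => false)
      = PySem.Chars.isdigit (out.getLastD ' ') := by
  cases h : out.getLast? with
  | none =>
    have : out = [] := by simpa [List.getLast?_eq_none_iff] using h
    subst this; simp [isdigit_space]
  | some d => simp [List.getLastD_eq_getLast?, h]

lemma fold_mySplit (cs : List Char) : ∀ (out : List Char),
    ((mySplit cs).drop 1).foldl joinStep (out ++ (mySplit cs).headD [])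
      = out ++ specB (out.getLastD ' ') cs := by
  induction cs with
  | nil => intro out; simp [mySplit, specB]
  | cons c cs' ih =>
    intro out
    by_cases hc : c = ','
    · subst hc
      rcases hsp : mySplit cs' with _ | ⟨h, t⟩
      · exact absurd hsp (mySplit_ne_nil cs')
      · have hjoin : joinStep out h
            = (out ++ [gfun (out.getLastD ' ') ',' (cs'.headD ' ')]) ++ h := by
          unfold joinStep gfun
          have h1 := getLast?_match_eq_getLastD out
          have h2 := mySplit_head_digit cs'
          rw [hsp] at h2; simp only [List.headD_cons] at h2
          rw [h1, h2]
          split_ifs <;> simp_all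
        have ih' := ih (out ++ [gfun (out.getLastD ' ') ',' (cs'.headD ' ')])
        rw [hsp] at ih'
        simp only [List.headD_cons, List.drop_one, List.tail_cons, List.append_assoc] at ih' ⊢
        simp only [mySplit, if_true, List.headD_cons, List.tail_cons, hsp, List.append_nil,
          List.foldl_cons]
        rw [hjoin]
        simp only [List.append_assoc] at ih' ⊢
        rw [ih']
        have hpr : specB ((out ++ [gfun (out.getLastD ' ') ',' (cs'.headD ' ')]).getLastD ' ') cs'
            = specB ',' cs' := by
          apply specB_congr
          have : (out ++ [gfun (out.getLastD ' ') ',' (cs'.headD ' ')]).getLastD ' '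
              = gfun (out.getLastD ' ') ',' (cs'.headD ' ') := by
            simp [List.getLastD_eq_getLast?]
          rw [this, isdigit_comma]
          unfold gfun; split_ifs <;> simp [isdigit_space, isdigit_comma] at *
        rw [hpr]
        simp [specB]
    · rcases hsp : mySplit cs' with _ | ⟨h, t⟩
      · exact absurd hsp (mySplit_ne_nil cs')
      · have ih' := ih (out ++ [c])
        rw [hsp] at ih'
        simp only [List.headD_cons, List.drop_one, List.tail_cons, List.append_assoc] at ih' ⊢
        simp only [mySplit, hc, if_false, List.tail_cons, hsp, List.headD_cons]
        have : out ++ c :: h = (out ++ [c]) ++ h := by simp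
        rw [this]
        simp only [List.append_assoc] at ih' ⊢
        rw [List.cons_append] at ih' ⊢
        rw [ih']
        have : (out ++ [c]).getLastD ' ' = c := by simp [List.getLastD_eq_getLast?]
        rw [this]
        simp [specB, gfun, hc]

lemma foldA_specA (cs : List Char) : ∀ (l pre acc : List Char),
    cs = pre ++ l →
    (l.foldl (handleCommaStep cs) (acc, (pre.length : Int))).1
      = acc ++ specA pre.isEmpty (pre.getLastD ' ') l := by
  intro l
  induction l with
  | nil => intro pre acc h; simp [specA]
  | cons c l' ih =>
    intro pre acc h
    rw [List.foldl_cons]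
    have hstep : handleCommaStep cs (acc, (pre.length : Int)) c
        = (acc ++ (if c ≠ ',' then [c]
            else if pre.isEmpty = false ∧ l' ≠ [] then
              [if PySem.Chars.isdigit (pre.getLastD ' ') && PySem.Chars.isdigit (l'.headD ' ') then ',' else ' ']
            else []), ((pre ++ [c]).length : Int)) := by
      unfold handleCommaStep
      have hlen : PySem.Chars.len cs = (pre.length : Int) + 1 + l'.length := by
        simp [PySem.Chars.len, h]; push_cast; ring
      by_cases hc : c = ','
      · subst hc
        simp only [ne_eq, not_true_eq_false, if_false]
        have hcond : (0 < (pre.length : Int) ∧ (pre.length : Int) < PySem.Chars.len cs - 1)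
            ↔ (pre.isEmpty = false ∧ l' ≠ []) := by
          rw [hlen]
          cases pre <;> cases l' <;> simp <;> omega
        by_cases hco : pre.isEmpty = false ∧ l' ≠ []
        · rw [if_pos (hcond.mpr hco)]
          obtain ⟨h1, h2⟩ := hco
          have hprev : PySem.List.pyGet? cs ((pre.length : Int) - 1) = some (pre.getLastD ' ') := by
            have hp : pre ≠ [] := by cases pre <;> simp_all
            have hn1 : pre.length ≠ 0 := by simpa using hp
            have hcast : ((pre.length : Int) - 1) = ((pre.length - 1 : Nat) : Int) := by omega
            rw [hcast, PySem.List.pyGet?_natCast, h]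
            have hn0 : pre.length ≠ 0 := by simpa using hp
            rw [List.getElem?_append_left (by omega)]
            rw [← List.getLast?_eq_getElem?]
            cases pe : pre.getLast? with
            | none => simp [List.getLast?_eq_none_iff] at pe; exact absurd pe hp
            | some x => simp [List.getLastD_eq_getLast?, pe]
          have hnext : PySem.List.pyGet? cs ((pre.length : Int) + 1) = some (l'.headD ' ') := by
            have hcast : ((pre.length : Int) + 1) = ((pre.length + 1 : Nat) : Int) := by push_cast; ring
            rw [hcast, PySem.List.pyGet?_natCast, h]
            rw [List.getElem?_append_right (by omega)]
            have hone : pre.length + 1 - pre.length = 1 := by omega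
            rw [hone]
            cases l' with
            | nil => exact absurd rfl h2
            | cons d l'' => simp
          rw [hprev, hnext]
          simp only [Option.getD_some]
          rw [if_pos (⟨h1, h2⟩ : pre.isEmpty = false ∧ ¬l' = [])]
          simp only [List.getLastD_eq_getLast?, List.headD_eq_head?_getD] at *
          split_ifs <;> simp
        · rw [if_neg (fun hx => hco (hcond.mp hx))]
          rw [if_neg (by simpa using hco)]
          simp
      · simp [hc]
    rw [hstep]
    rw [ih (pre ++ [c]) _ (by simp [h])]
    have h1 : (pre ++ [c]).isEmpty = false := by simp
    have h2 : (pre ++ [c]).getLastD ' ' = c := by simp [List.getLastD_eq_getLast?]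
    rw [h1, h2]
    conv_rhs => rw [specA]
    simp [List.append_assoc]

lemma specB_specA (l : List Char) : ∀ (prev : Char),
    specB prev l = specA false prev l
      ++ (if l.getLastD ' ' = ',' ∧ l ≠ [] then [' '] else []) := by
  induction l with
  | nil => intro prev; simp [specB, specA]
  | cons c l' ih =>
    intro prev
    cases l' with
    | nil =>
      by_cases hc : c = ','
      · subst hc; simp [specB, specA, gfun, isdigit_space]
      · simp [specB, specA, gfun, hc]
    | cons d l'' =>
      have ih' := ih c
      simp only [specB, specA] at ih' ⊢
      rw [ih']
      have hlast : (c :: d :: l'').getLastD ' ' = (d :: l'').getLastD ' ' := by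
        simp [List.getLastD_eq_getLast?, List.getLast?_cons_cons]
      rw [hlast]
      by_cases hc2 : c = ',' <;> simp [hc2, gfun]

lemma go_append_space (l : List Char) : ∀ (cur : List Char) (acc : List (List Char)),
    PySem.Chars.split₀.go (l ++ [' ']) cur acc = PySem.Chars.split₀.go l cur acc := by
  induction l with
  | nil =>
    intro cur acc
    by_cases h : cur = [] <;>
      simp [PySem.Chars.split₀.go, PySem.Chars.isspace, h]
  | cons c l' ih =>
    intro cur acc
    by_cases h : PySem.Chars.isspace c = true <;>
      simp [PySem.Chars.split₀.go, h, ih]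

lemma split₀_append_space (l : List Char) :
    PySem.Chars.split₀ (l ++ [' ']) = PySem.Chars.split₀ l := by
  simp [PySem.Chars.split₀, go_append_space]

lemma split₀_cons_space (l : List Char) :
    PySem.Chars.split₀ (' ' :: l) = PySem.Chars.split₀ l := by
  simp [PySem.Chars.split₀, PySem.Chars.split₀.go, PySem.Chars.isspace]

lemma split₀_specB_specA (cs : List Char) :
    PySem.Chars.split₀ (specB ' ' cs) = PySem.Chars.split₀ (specA true ' ' cs) := by
  cases cs with
  | nil => rfl
  | cons c l =>
    have hB : specB ' ' (c :: l)
        = ((gfun ' ' c (l.headD ' ') :: specA false c l)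
            ++ (if l.getLastD ' ' = ',' ∧ l ≠ [] then [' '] else [])) := by
      simp only [specB]
      rw [specB_specA l c]
      simp
    rw [hB]
    have hA : specA true ' ' (c :: l) = (if c ≠ ',' then [c] else []) ++ specA false c l := by
      simp only [specA]
      by_cases hc : c = ',' <;> simp [hc]
    have core : PySem.Chars.split₀ (gfun ' ' c (l.headD ' ') :: specA false c l)
        = PySem.Chars.split₀ (specA true ' ' (c :: l)) := by
      rw [hA]
      by_cases hc : c = ','
      · subst hc
        have : gfun ' ' ',' (l.headD ' ') = ' ' := by simp [gfun, isdigit_space]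
        rw [this, split₀_cons_space]
        simp
      · simp [gfun, hc]
    by_cases htl : l.getLastD ' ' = ',' ∧ l ≠ []
    · rw [if_pos htl, split₀_append_space, core]
    · rw [if_neg htl, List.append_nil, core]

-- ===== VERDICT (by name: the statement is the Claim_ definition above) =====
theorem handle_comma_py_spec : Claim_equal_handle_comma_py := by
  intro input _
  unfold Spec_handle_comma_py handle_comma_py handle_comma_py_alt
  have hA := foldA_specA input.toList input.toList [] [] rfl
  simp only [List.length_nil, Nat.cast_zero, List.isEmpty_nil, List.getLastD_nil,
    List.nil_append] at hA
  have hB := fold_mySplit input.toList []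
  simp only [List.nil_append, List.getLastD_nil] at hB
  simp only [splitOn_eq_mySplit]
  rw [hB, hA, split₀_specB_specA]
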